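-- pv_equiv track=rewrite | github.com/semenko/rseqc-redux | rseqc/bam_cigar.py | fetch_deletion_range
-- ===== SOURCE A (Python) =====
-- def fetch_deletion_range(cigar: list[tuple[int, int]]) -> list[tuple[int, int]]:
--     """fetch deletion regions defined by cigar. st must be zero based
--     return list of tuple of (st, end). 'st','end' is relative to the
--     start of read.
--     """
--     del_bound = []
--     st = 0
--     for c, s in cigar:  # code and size
--         if c == 0:  # match
--             st += s
--         elif c == 4:
--             st += s  # soft clip
--         elif c == 1:  # insertion to ref
--             st += s
--         elif c == 2:  # deletion to ref
--             del_bound.append((st, s))  # only record the start position of deletion, and the deletion size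
--         elif c == 3:  # gap or intron
--             continue
--         else:
--             continue
--     return del_bound
-- ===== SOURCE B (Python) =====
-- def fetch_deletion_range(cigar: list[tuple[int, int]]) -> list[tuple[int, int]]:
--     # Build an exclusive prefix-offset table (read position before each op),
--     # then filter deletion ops with a zip comprehension.
--     offs = [0]
--     for c, s in cigar:
--         offs.append(offs[-1] + (s if c in (0, 1, 4) else 0))
--     return [(o, s) for o, (c, s) in zip(offs, cigar) if c == 2]
-- ===== Notes on version B (the rewrite author's own statement) =====
-- stated objective: alternative
-- what changed: Replaces A's single accumulator-threaded branch loop with two passes: an exclusive prefix-offset table over the read-advance of each op, then a zip/filter comprehension over deletion ops.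
import Mathlib
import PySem

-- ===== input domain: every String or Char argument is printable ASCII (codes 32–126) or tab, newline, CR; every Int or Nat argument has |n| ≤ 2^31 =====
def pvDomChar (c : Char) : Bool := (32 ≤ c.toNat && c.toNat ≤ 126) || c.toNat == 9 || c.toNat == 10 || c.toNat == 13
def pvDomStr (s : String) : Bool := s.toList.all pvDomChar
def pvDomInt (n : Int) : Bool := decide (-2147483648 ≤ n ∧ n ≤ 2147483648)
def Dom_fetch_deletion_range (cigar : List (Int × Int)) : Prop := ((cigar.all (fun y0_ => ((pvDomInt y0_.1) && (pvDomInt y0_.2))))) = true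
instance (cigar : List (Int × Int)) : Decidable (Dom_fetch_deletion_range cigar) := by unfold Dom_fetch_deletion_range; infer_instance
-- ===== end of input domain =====

-- B replaces A's single accumulator-threaded loop with an exclusive prefix-offset table
-- followed by a zip/filter pass over deletion ops (alternative decomposition, same cost).


-- ===== PORT A =====
-- loop body of A (one iteration over state (st, del_bound))
def fdrStepA (st_db : Int × List (Int × Int)) (cs : Int × Int) : Int × List (Int × Int) :=
  let st := st_db.1
  let db := st_db.2
  let c := cs.1
  let s := cs.2
  if c == 0 then (st + s, db)
  else if c == 4 then (st + s, db)
  else if c == 1 then (st + s, db)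
  else if c == 2 then (st, db ++ [(st, s)])
  else if c == 3 then (st, db)
  else (st, db)

def fetch_deletion_range (cigar : List (Int × Int)) : List (Int × Int) :=
  (cigar.foldl fdrStepA ((0 : Int), ([] : List (Int × Int)))).2

-- ===== PORT B =====
def fetch_deletion_range_alt (cigar : List (Int × Int)) : List (Int × Int) :=
  let offs : List Int := cigar.foldl
    (fun acc cs => acc ++ [acc.getLastD 0 + (if cs.1 == 0 || cs.1 == 1 || cs.1 == 4 then cs.2 else 0)])
    [0]
  (List.zip offs cigar).filterMap (fun p => if p.2.1 == 2 then some (p.1, p.2.2) else none)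

-- ===== PRECONDITION & SPEC =====
def Spec_fetch_deletion_range (cigar : List (Int × Int)) (out : List (Int × Int)) : Prop := out = fetch_deletion_range_alt cigar
instance (cigar : List (Int × Int)) (out : List (Int × Int)) : Decidable (Spec_fetch_deletion_range cigar out) := by unfold Spec_fetch_deletion_range; infer_instance

-- ===== CLAIM (what is proved, stated in full; the proofs are below) =====
def Claim_equal_fetch_deletion_range : Prop := ∀ (cigar : List (Int × Int)), Dom_fetch_deletion_range cigar → Spec_fetch_deletion_range cigar (fetch_deletion_range cigar)

-- ===== LEMMAS AND PROOFS =====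

-- reference recursion: deletion ranges of t with current read position st
def fdrRec : List (Int × Int) → Int → List (Int × Int)
  | [], _ => []
  | cs :: t, st =>
      (if cs.1 == 2 then [(st, cs.2)] else []) ++
      fdrRec t (st + (if cs.1 == 0 || cs.1 == 1 || cs.1 == 4 then cs.2 else 0))

-- reference scan: exclusive prefix offsets of t starting at st
def fdrOffs : List (Int × Int) → Int → List Int
  | [], st => [st]
  | cs :: t, st => st :: fdrOffs t (st + (if cs.1 == 0 || cs.1 == 1 || cs.1 == 4 then cs.2 else 0))

theorem fdr_A_foldl (t : List (Int × Int)) :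
    ∀ (st : Int) (db : List (Int × Int)),
      (t.foldl fdrStepA (st, db)).2 = db ++ fdrRec t st := by
  induction t with
  | nil => intro st db; simp [fdrRec]
  | cons cs t ih =>
      intro st db
      rw [List.foldl_cons]
      by_cases h0 : (cs.1 == 0) = true
      · have hs : fdrStepA (st, db) cs = (st + cs.2, db) := by simp [fdrStepA, h0]
        have h2 : ¬ (cs.1 == 2) = true := by simp_all
        rw [hs, ih]
        simp [fdrRec, h0, h2]
      · by_cases h4 : (cs.1 == 4) = true
        · have hs : fdrStepA (st, db) cs = (st + cs.2, db) := by simp [fdrStepA, h0, h4]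
          have h2 : ¬ (cs.1 == 2) = true := by simp_all
          rw [hs, ih]
          simp [fdrRec, h4, h2]
        · by_cases h1 : (cs.1 == 1) = true
          · have hs : fdrStepA (st, db) cs = (st + cs.2, db) := by simp [fdrStepA, h0, h4, h1]
            have h2 : ¬ (cs.1 == 2) = true := by simp_all
            rw [hs, ih]
            simp [fdrRec, h1, h2]
          · by_cases h2 : (cs.1 == 2) = true
            · have hs : fdrStepA (st, db) cs = (st, db ++ [(st, cs.2)]) := by
                simp [fdrStepA, h0, h4, h1, h2]
              rw [hs, ih]
              simp [fdrRec, h0, h4, h1, h2]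
            · have hs : fdrStepA (st, db) cs = (st, db) := by
                by_cases h3 : (cs.1 == 3) = true <;> simp [fdrStepA, h0, h4, h1, h2, h3]
              rw [hs, ih]
              simp [fdrRec, h0, h4, h1, h2]

theorem fdr_offs_foldl (t : List (Int × Int)) :
    ∀ (acc : List Int) (st : Int),
      (t.foldl (fun acc cs =>
          acc ++ [acc.getLastD 0 + (if cs.1 == 0 || cs.1 == 1 || cs.1 == 4 then cs.2 else 0)])
        (acc ++ [st])) = acc ++ fdrOffs t st := by
  induction t with
  | nil => intro acc st; simp [fdrOffs]
  | cons cs t ih =>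
      intro acc st
      simp only [List.foldl_cons]
      have hlast : (acc ++ [st]).getLastD 0 = st := by simp
      rw [hlast]
      have := ih (acc ++ [st]) (st + (if cs.1 == 0 || cs.1 == 1 || cs.1 == 4 then cs.2 else 0))
      simpa [fdrOffs] using this

theorem fdr_zip_filter (t : List (Int × Int)) :
    ∀ (st : Int),
      (List.zip (fdrOffs t st) t).filterMap
        (fun p => if p.2.1 == 2 then some (p.1, p.2.2) else none) = fdrRec t st := by
  induction t with
  | nil => intro st; simp [fdrOffs, fdrRec]
  | cons cs t ih =>
      intro st
      simp only [fdrOffs, fdrRec, List.zip_cons_cons, List.filterMap_cons]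
      by_cases h2 : (cs.1 == 2) = true
      · rw [if_pos h2, ih]
        simp [h2]
      · rw [if_neg h2, ih]
        simp [h2]

-- ===== VERDICT (by name: the statement is the Claim_ definition above) =====
theorem fetch_deletion_range_spec : Claim_equal_fetch_deletion_range := by
  intro cigar _
  show fetch_deletion_range cigar = fetch_deletion_range_alt cigar
  unfold fetch_deletion_range fetch_deletion_range_alt
  rw [fdr_A_foldl cigar 0 []]
  have h := fdr_offs_foldl cigar [] 0
  simp only [List.nil_append] at h ⊢
  rw [h, fdr_zip_filter]
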